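-- pv_equiv track=rewrite | github.com/alladin2012/Boogle_project | ex11_utils.py | _get_paths_for_each_length
-- ===== SOURCE A (Python) =====
-- from typing import List, Tuple, Iterable, Optional, Set, Dict
--
-- Board = List[List[str]]
--
-- Path = List[Tuple[int, int]]
--
-- OPTIONAL_MOVES = [(-1, -1), (-1, 0), (1, 0), (0, -1), (0, 0), (0, 1), (1, 1), (-1, 1), (1, -1)]
--
-- def _words_starts_with(words: Set[str], word: str) -> Set[str]:
--     """"Return all words from the given Set that starts with the given word."""
--     return set([curr_word for curr_word in words if curr_word.startswith(word)])
--
-- def _safe_to_move(next_i: int, next_j: int, board: Board, path: Path) -> bool: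
--     """"Check if the given next location is valid for the current path."""
--     if (next_i >= len(board) or next_i < 0 or next_j >= len(board[0]) or next_j < 0):
--         return False
--     return (next_i, next_j) not in path
--
-- def _is_word_on_board(board: Board, word: str):
--     """Check if the word's characters even appear on the board,
--         if they don't appear we don't even need to check them."""
--     all_in_board = ''.join((set(char for row in board for char in row)))
--     for char in word:
--         if (char not in all_in_board):
--             return False
--     return True
--
-- def _get_paths_for_each_length(board: Board, words: Iterable[str]) -> Dict[int, List[Path]]:
--     """Get all available paths for each path length, as a dictionary of key-value where
--         the key is the path length, and the value is a list of all paths in that length."""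
--     paths = {}
--     words_found: Set[str] = set()
--     words_set: Set[str] = set(words)
--     for i in range(len(board) ** 2, 0, -1):
--         i_paths, words_found = _find_length_n_paths_return_words(i, board, words_set)
--         if (len(i_paths) > 0):
--             paths[i] = i_paths
--             #remove words found - we assume going top to bottom so we always get
--             # the highest score for the word first
--             words_set.difference_update(words_found)
--     return paths
--
-- def _find_length_n_paths_return_words(n: int, board: Board, words: Iterable[str]) -> Tuple[List[Path], Set[str]]:
--     """"Get all the paths of given length in the given board for a given words dictionary.
--         Alongside the paths, return all the words that match those paths."""
--     if (isinstance(words, dict)):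
--         words = words.keys()
--     words_on_board = set(filter(lambda word: _is_word_on_board(board, word), words))
--     words_found: Set[str] = set()
--     paths: List[Path] = []
--     for i in range(len(board)):
--         for j in range(len(board[0])):
--             #start with current cell
--             start_path = [(i, j)]
--             start_cell = board[i][j]
--             start_words = _words_starts_with(words_on_board, board[i][j])
--             #add length n paths for current cell
--             _find_length_n_paths_return_words_helper(n, board, start_words, words_found, i, j, start_cell, start_path, paths)
--     return (paths, words_found)
--
-- def _find_length_n_paths_return_words_helper(n: int, board: Board, words: Set[str], words_found: Set[str],
--                                              i:int, j: int,curr_word: str, curr_path: Path, finished_paths: List[Path]):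
--     """Iterate the board, find paths of length n that fit a word in the words set.
--         During a spefiic path-trial, filter out words that won't fit."""
--     if (len(curr_path) == n):
--         #finish case: path length is n
--         if (curr_word in words):
--             words_found.add(curr_word)
--             finished_paths.append(curr_path.copy())
--         return
--     #prune branches that don't have any words left
--     if (len(words) == 0):
--         return
--
--     for move in OPTIONAL_MOVES:
--         next_i = i + move[0]
--         next_j = j + move[1]
--         if (_safe_to_move(next_i, next_j, board, curr_path)):
--             #move forward
--             new_word = curr_word + board[next_i][next_j]
--             new_path = curr_path + [(next_i, next_j)]
--             #filter out words that won't fit current path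
--             new_words = _words_starts_with(words, new_word)
--             _find_length_n_paths_return_words_helper(n, board, new_words, words_found, next_i, next_j,
--                                                      new_word, new_path, finished_paths)
-- ===== SOURCE B (Python) =====
-- # B: one level-by-level (BFS) expansion of all simple paths, collecting per-length
-- # match buckets in a single sweep, then a descending-length dedup pass - instead of
-- # A's separate whole-board depth-n DFS for every single length n.
-- def _get_paths_for_each_length(board, words):
--     rows = len(board)
--     cols = len(board[0]) if board else 0
--     max_len = rows * rows  # the function's length range is 1..len(board)**2
--     chars = set(ch for row in board for cell in row for ch in cell)
--     alive = {w for w in set(words) if all(ch in chars for ch in w)}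
--     moves = [(-1, -1), (-1, 0), (1, 0), (0, -1), (0, 1), (1, 1), (-1, 1), (1, -1)]
--     frontier = [([(i, j)], board[i][j]) for i in range(rows) for j in range(cols)]
--     buckets = {}
--     n = 1
--     while frontier and n <= max_len:
--         bucket = [(p, w) for (p, w) in frontier if w in alive]
--         if bucket:
--             buckets[n] = bucket
--         frontier = [(p + [(ni, nj)], w + board[ni][nj])
--                     for (p, w) in frontier
--                     if any(x.startswith(w) for x in alive)
--                     for (ni, nj) in ((p[-1][0] + di, p[-1][1] + dj) for (di, dj) in moves)
--                     if 0 <= ni < rows and 0 <= nj < cols and (ni, nj) not in p]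
--         n += 1
--     result = {}
--     remaining = set(words)
--     for n in range(max_len, 0, -1):
--         kept = [(p, w) for (p, w) in buckets.get(n, []) if w in remaining]
--         if kept:
--             result[n] = [p for (p, w) in kept]
--             remaining.difference_update(w for (p, w) in kept)
--     return result
-- ===== Notes on version B (the rewrite author's own statement) =====
-- stated objective: faster
-- what changed: Replaces A's separate pruned depth-n DFS over the whole board for every single length n (len(board)^2 independent searches) by one level-by-level expansion of all simple paths that collects every length's matching (path, word) buckets in a single sweep, followed by a descending-length dedup pass over the buckets.
import Mathlib
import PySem

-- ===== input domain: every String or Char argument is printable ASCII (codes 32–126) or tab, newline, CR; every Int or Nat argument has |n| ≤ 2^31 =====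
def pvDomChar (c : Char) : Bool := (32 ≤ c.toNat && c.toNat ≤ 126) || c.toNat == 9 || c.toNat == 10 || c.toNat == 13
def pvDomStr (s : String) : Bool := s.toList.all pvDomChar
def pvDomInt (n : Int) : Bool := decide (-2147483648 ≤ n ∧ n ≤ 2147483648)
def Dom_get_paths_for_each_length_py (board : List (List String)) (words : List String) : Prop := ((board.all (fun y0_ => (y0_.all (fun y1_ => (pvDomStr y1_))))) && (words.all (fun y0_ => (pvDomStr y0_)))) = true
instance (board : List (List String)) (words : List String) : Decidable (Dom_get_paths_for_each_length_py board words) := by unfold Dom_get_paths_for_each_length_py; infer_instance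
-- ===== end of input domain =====

-- B replaces A's per-length whole-board DFS (one search for every n) by a single
-- level-by-level expansion collecting all lengths at once, then a descending dedup pass.

-- ===== PORT A =====
def pvMovesA : List (Int × Int) := [(-1,-1),(-1,0),(1,0),(0,-1),(0,0),(0,1),(1,1),(-1,1),(1,-1)]

-- board[i][j]; every caller guards the indices in range, the defaults are unreachable
def pvCell (board : List (List String)) (i j : Int) : String :=
  PySem.List.pyGetD (PySem.List.pyGetD board i []) j ""

def words_starts_with_py (words : PySem.Set String) (word : String) : PySem.Set String :=
  PySem.Set.ofList (List.filter (fun cw => PySem.Str.startswith cw word) words)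

def safe_to_move_py (ni nj : Int) (board : List (List String)) (path : List (Int × Int)) : Bool :=
  if (board.length : Int) ≤ ni ∨ ni < 0 ∨ ((PySem.List.pyGetD board 0 []).length : Int) ≤ nj ∨ nj < 0 then
    false
  else decide ((ni, nj) ∉ path)

-- ''.join of the SET of cell strings, joined here in first-occurrence order: membership of a
-- single character in the join does not depend on the set's iteration order, so this is exact
def is_word_on_board_py (board : List (List String)) (word : String) : Bool :=
  let all_in_board : String := PySem.Str.join "" (PySem.Set.ofList (board.flatMap id))
  word.toList.all (fun c => PySem.Str.isIn (String.ofList [c]) all_in_board)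

-- the recursion of _find_length_n_paths_return_words_helper; fuel = n - len(curr_path)
-- at every call, so the fuel-0 fallback is unreachable
def find_helper_py (board : List (List String)) (n : Int) (fuel : Nat)
    (words found : PySem.Set String) (i j : Int) (cw : String)
    (path : List (Int × Int)) (fin : List (List (Int × Int))) :
    List (List (Int × Int)) × PySem.Set String :=
  if (path.length : Int) = n then
    (if PySem.Set.contains words cw then (fin ++ [path], PySem.Set.add found cw) else (fin, found))
  else if PySem.Set.len words = 0 then (fin, found)
  else
    match fuel with
    | 0 => (fin, found)
    | fuel' + 1 =>
      pvMovesA.foldl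
        (fun st mv =>
          let ni := i + mv.1
          let nj := j + mv.2
          if safe_to_move_py ni nj board path then
            find_helper_py board n fuel' (words_starts_with_py words (cw ++ pvCell board ni nj))
              st.2 ni nj (cw ++ pvCell board ni nj) (path ++ [(ni, nj)]) st.1
          else st)
        (fin, found)

def find_length_n_paths_return_words_py (n : Int) (board : List (List String))
    (words : PySem.Set String) : List (List (Int × Int)) × PySem.Set String :=
  let words_on_board : PySem.Set String :=
    PySem.Set.ofList (List.filter (fun w => is_word_on_board_py board w) words)
  (PySem.List.pyRange 0 (board.length : Int) 1).foldl
    (fun st i =>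
      (PySem.List.pyRange 0 ((PySem.List.pyGetD board 0 []).length : Int) 1).foldl
        (fun st j =>
          find_helper_py board n (n - 1).toNat
            (words_starts_with_py words_on_board (pvCell board i j)) st.2 i j
            (pvCell board i j) [(i, j)] st.1)
        st)
    ([], PySem.Set.empty)

def get_paths_for_each_length_py (board : List (List String)) (words : List String) :
    List (Int × List (List (Int × Int))) :=
  ((PySem.List.pyRange ((board.length : Int) ^ 2) 0 (-1)).foldl
      (fun st i =>
        let r := find_length_n_paths_return_words_py i board st.2
        if 0 < r.1.length then (st.1 ++ [(i, r.1)], PySem.Set.diff st.2 r.2) else st)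
      (([] : List (Int × List (List (Int × Int)))), PySem.Set.ofList words)).1

-- ===== PORT B =====
def pvMovesB : List (Int × Int) := [(-1,-1),(-1,0),(1,0),(0,-1),(0,1),(1,1),(-1,1),(1,-1)]

-- one expansion step of the frontier (the comprehension building the next frontier)
def pvBStep (board : List (List String)) (rows cols : Int) (alive : PySem.Set String)
    (frontier : List (List (Int × Int) × String)) : List (List (Int × Int) × String) :=
  frontier.flatMap (fun pw =>
    if alive.any (fun x => PySem.Str.startswith x pw.2) then
      pvMovesB.flatMap (fun mv =>
        let ij := PySem.List.pyGetD pw.1 (-1) (0, 0)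
        let ni := ij.1 + mv.1
        let nj := ij.2 + mv.2
        if 0 ≤ ni ∧ ni < rows ∧ 0 ≤ nj ∧ nj < cols ∧ (ni, nj) ∉ pw.1 then
          [(pw.1 ++ [(ni, nj)], pw.2 ++ pvCell board ni nj)]
        else [])
    else [])

-- the 'while frontier and n <= max_len' loop; fuel counts the remaining lengths up to max_len
def pvBLoop (board : List (List String)) (rows cols : Int) (alive : PySem.Set String)
    (fuel : Nat) (n : Int) (frontier : List (List (Int × Int) × String))
    (buckets : PySem.Dict Int (List (List (Int × Int) × String))) :
    PySem.Dict Int (List (List (Int × Int) × String)) :=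
  match fuel with
  | 0 => buckets
  | fuel' + 1 =>
    if frontier.isEmpty then buckets
    else
      let bucket := frontier.filter (fun pw => PySem.Set.contains alive pw.2)
      let buckets' := if bucket.isEmpty then buckets else buckets.insert n bucket
      pvBLoop board rows cols alive fuel' (n + 1) (pvBStep board rows cols alive frontier) buckets'

def get_paths_for_each_length_py_alt (board : List (List String)) (words : List String) :
    List (Int × List (List (Int × Int))) :=
  let rows : Int := board.length
  let cols : Int := if board.isEmpty then 0 else ((PySem.List.pyGetD board 0 []).length : Int)
  let maxLen : Int := rows * rows
  let chars : PySem.Set Char :=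
    PySem.Set.ofList (board.flatMap (fun row => row.flatMap (fun cell => cell.toList)))
  let alive : PySem.Set String :=
    PySem.Set.ofList
      (List.filter (fun w => w.toList.all (fun ch => PySem.Set.contains chars ch))
        (PySem.Set.ofList words))
  let frontier0 : List (List (Int × Int) × String) :=
    (PySem.List.pyRange 0 rows 1).flatMap (fun i =>
      (PySem.List.pyRange 0 cols 1).map (fun j => ([(i, j)], pvCell board i j)))
  let buckets := pvBLoop board rows cols alive maxLen.toNat 1 frontier0 PySem.Dict.empty
  ((PySem.List.pyRange maxLen 0 (-1)).foldl
      (fun st n =>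
        let kept := (buckets.getD n []).filter (fun pw => PySem.Set.contains st.2 pw.2)
        if kept.isEmpty then st
        else (st.1 ++ [(n, kept.map (·.1))], PySem.Set.diff st.2 (kept.map (·.2))))
      (([] : List (Int × List (List (Int × Int)))), PySem.Set.ofList words)).1

-- ===== PRECONDITION & SPEC =====
-- Pre_ excludes exactly the inputs on which A raises IndexError: a board with some row
-- shorter than the first row (board[i][j] is read for every j < len(board[0])).
def Pre_get_paths_for_each_length_py (board : List (List String)) (words : List String) : Prop :=
  ∀ row ∈ board, (board.headD []).length ≤ row.length
instance (board : List (List String)) (words : List String) :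
    Decidable (Pre_get_paths_for_each_length_py board words) := by
  unfold Pre_get_paths_for_each_length_py; infer_instance

def pvWitness_get_paths_for_each_length_py : List (List String) × List String := ([["a"]], ["a"])

def Spec_get_paths_for_each_length_py (board : List (List String)) (words : List String)
    (out : List (Int × List (List (Int × Int)))) : Prop :=
  out = get_paths_for_each_length_py_alt board words
instance (board : List (List String)) (words : List String)
    (out : List (Int × List (List (Int × Int)))) :
    Decidable (Spec_get_paths_for_each_length_py board words out) := by
  unfold Spec_get_paths_for_each_length_py; infer_instance

-- ===== CLAIM (what is proved, stated in full; the proofs are below) =====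
def Claim_equal_get_paths_for_each_length_py : Prop := ∀ (board : List (List String)) (words : List String), Dom_get_paths_for_each_length_py board words → Pre_get_paths_for_each_length_py board words → Spec_get_paths_for_each_length_py board words (get_paths_for_each_length_py board words)

-- ===== LEMMAS AND PROOFS =====

-- ---------- generic helpers about the A-side search tree ----------

-- words-found accumulation: Python's repeated words_found.add
def pvAddAll (s : PySem.Set String) (l : List String) : PySem.Set String :=
  l.foldl PySem.Set.add s

lemma pv_mem_addAll (s : PySem.Set String) (l : List String) (y : String) :
    y ∈ pvAddAll s l ↔ y ∈ s ∨ y ∈ l := by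
  have h := PySem.Set.mem_foldl_add l (fun b => b) s y
  simpa [pvAddAll] using h

lemma pvAddAll_append (s : PySem.Set String) (l1 l2 : List String) :
    pvAddAll s (l1 ++ l2) = pvAddAll (pvAddAll s l1) l2 := by
  simp [pvAddAll]

lemma pv_set_len_zero (s : PySem.Set String) : PySem.Set.len s = 0 ↔ s = [] := by
  simp [PySem.Set.len, List.length_eq_zero_iff]

lemma pv_mem_wsw (S : PySem.Set String) (word w : String) :
    w ∈ words_starts_with_py S word ↔ w ∈ S ∧ word.toList <+: w.toList := by
  simp [words_starts_with_py, PySem.Set.mem_ofList, List.mem_filter,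
    PySem.Str.startswith_eq, PySem.Chars.startswith_iff]

-- one expansion of a search node, in A's move order (the (0,0) move is blocked by the path test)
def pvExt (board : List (List String)) (x : List (Int × Int) × String) :
    List (List (Int × Int) × String) :=
  pvMovesA.flatMap (fun mv =>
    let ij := PySem.List.pyGetD x.1 (-1) (0, 0)
    let ni := ij.1 + mv.1
    let nj := ij.2 + mv.2
    if safe_to_move_py ni nj board x.1 then
      [(x.1 ++ [(ni, nj)], x.2 ++ pvCell board ni nj)]
    else [])

-- all descendants of a node exactly k expansions deep, in DFS (= A's) order
def pvGrow (board : List (List String)) : Nat → (List (Int × Int) × String) → List (List (Int × Int) × String)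
  | 0, x => [x]
  | k + 1, x => (pvExt board x).flatMap (pvGrow board k)

lemma pv_ext_mem (board : List (List String)) (x c : List (Int × Int) × String)
    (hc : c ∈ pvExt board x) :
    c.1 ≠ [] ∧ x.2.toList <+: c.2.toList := by
  simp only [pvExt, List.mem_flatMap] at hc
  obtain ⟨mv, _, hc⟩ := hc
  by_cases hs : safe_to_move_py ((PySem.List.pyGetD x.1 (-1) (0, 0)).1 + mv.1)
      ((PySem.List.pyGetD x.1 (-1) (0, 0)).2 + mv.2) board x.1 = true
  · simp only [hs, if_true, List.mem_singleton] at hc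
    subst hc
    exact ⟨by simp, by simp [String.toList_append]⟩
  · simp [hs] at hc

lemma pv_grow_prefix (board : List (List String)) :
    ∀ (k : Nat) (x y : List (Int × Int) × String),
      y ∈ pvGrow board k x → x.2.toList <+: y.2.toList := by
  intro k
  induction k with
  | zero => intro x y h; simp [pvGrow] at h; subst h; exact List.prefix_refl _
  | succ k ih =>
    intro x y h
    simp only [pvGrow, List.mem_flatMap] at h
    obtain ⟨c, hc, hy⟩ := h
    exact (pv_ext_mem board x c hc).2.trans (ih c y hy)

-- ---------- the A-side DFS computes a filtered pvGrow ----------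

-- one step of A's move loop, over an arbitrary move list
def pvExtOver (board : List (List String)) (ms : List (Int × Int)) (i j : Int)
    (path : List (Int × Int)) (cw : String) : List (List (Int × Int) × String) :=
  ms.flatMap (fun mv =>
    if safe_to_move_py (i + mv.1) (j + mv.2) board path then
      [(path ++ [(i + mv.1, j + mv.2)], cw ++ pvCell board (i + mv.1) (j + mv.2))]
    else [])

lemma pvExtOver_movesA (board : List (List String)) (i j : Int)
    (path : List (Int × Int)) (cw : String)
    (h : PySem.List.pyGetD path (-1) (0, 0) = (i, j)) :
    pvExtOver board pvMovesA i j path cw = pvExt board (path, cw) := by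
  simp [pvExtOver, pvExt, h]

lemma pv_fold_moves (board : List (List String)) (S : PySem.Set String) (f : Nat)
    (IH : ∀ (n : Int) (Sf found : PySem.Set String) (i j : Int) (cw : String)
        (path : List (Int × Int)) (fin : List (List (Int × Int))),
        PySem.List.pyGetD path (-1) (0, 0) = (i, j) → path ≠ [] →
        (path.length : Int) + (f : Int) = n →
        (∀ w, w ∈ Sf ↔ w ∈ S ∧ cw.toList <+: w.toList) →
        find_helper_py board n f Sf found i j cw path fin =
          (fin ++ ((pvGrow board f (path, cw)).filter (fun y => PySem.Set.contains S y.2)).map (·.1),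
           pvAddAll found (((pvGrow board f (path, cw)).filter (fun y => PySem.Set.contains S y.2)).map (·.2)))) :
    ∀ (ms : List (Int × Int)) (n : Int) (Sf found : PySem.Set String) (i j : Int) (cw : String)
      (path : List (Int × Int)) (fin : List (List (Int × Int))),
      PySem.List.pyGetD path (-1) (0, 0) = (i, j) → path ≠ [] →
      (path.length : Int) + ((f : Int) + 1) = n →
      (∀ w, w ∈ Sf ↔ w ∈ S ∧ cw.toList <+: w.toList) →
      ms.foldl
        (fun st mv =>
          if safe_to_move_py (i + mv.1) (j + mv.2) board path then
            find_helper_py board n f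
              (words_starts_with_py Sf (cw ++ pvCell board (i + mv.1) (j + mv.2))) st.2
              (i + mv.1) (j + mv.2) (cw ++ pvCell board (i + mv.1) (j + mv.2))
              (path ++ [(i + mv.1, j + mv.2)]) st.1
          else st) (fin, found)
      = (fin ++ (((pvExtOver board ms i j path cw).flatMap (pvGrow board f)).filter
            (fun y => PySem.Set.contains S y.2)).map (·.1),
         pvAddAll found ((((pvExtOver board ms i j path cw).flatMap (pvGrow board f)).filter
            (fun y => PySem.Set.contains S y.2)).map (·.2))) := by
  intro ms
  induction ms with
  | nil => intro n Sf found i j cw path fin _ _ _ _; simp [pvExtOver, pvAddAll]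
  | cons mv ms ihm =>
    intro n Sf found i j cw path fin h1 h2 h3 h4
    simp only [List.foldl_cons]
    by_cases hs : safe_to_move_py (i + mv.1) (j + mv.2) board path = true
    · have hrec := IH n (words_starts_with_py Sf (cw ++ pvCell board (i + mv.1) (j + mv.2)))
        found (i + mv.1) (j + mv.2) (cw ++ pvCell board (i + mv.1) (j + mv.2))
        (path ++ [(i + mv.1, j + mv.2)]) fin
        (PySem.List.pyGetD_neg_one_append_singleton path _ _)
        (by simp)
        (by simp only [List.length_append, List.length_cons, List.length_nil]
            push_cast at h3 ⊢
            omega)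
        (by
          intro w
          rw [pv_mem_wsw]
          constructor
          · rintro ⟨hw, hp⟩
            exact ⟨((h4 w).mp hw).1, hp⟩
          · rintro ⟨hw, hp⟩
            refine ⟨(h4 w).mpr ⟨hw, ?_⟩, hp⟩
            exact (by simp [String.toList_append] : cw.toList <+: (cw ++ pvCell board (i + mv.1) (j + mv.2)).toList).trans hp)
      simp only [hs, if_true, hrec]
      rw [ihm n Sf (pvAddAll found
            (((pvGrow board f (path ++ [(i + mv.1, j + mv.2)], cw ++ pvCell board (i + mv.1) (j + mv.2))).filter
              (fun y => PySem.Set.contains S y.2)).map (·.2)))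
          i j cw path
          (fin ++ ((pvGrow board f (path ++ [(i + mv.1, j + mv.2)], cw ++ pvCell board (i + mv.1) (j + mv.2))).filter
              (fun y => PySem.Set.contains S y.2)).map (·.1))
          h1 h2 h3 h4]
      simp [pvExtOver, hs, List.filter_append, List.map_append, pvAddAll_append, List.append_assoc]
    · have hs' : safe_to_move_py (i + mv.1) (j + mv.2) board path = false := by
        simpa using hs
      simp only [hs', Bool.false_eq_true, if_false]
      rw [ihm n Sf found i j cw path fin h1 h2 h3 h4]
      simp [pvExtOver, hs']

theorem pv_helper_char (board : List (List String)) (S : PySem.Set String) :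
    ∀ (f : Nat) (n : Int) (Sf found : PySem.Set String) (i j : Int) (cw : String)
      (path : List (Int × Int)) (fin : List (List (Int × Int))),
      PySem.List.pyGetD path (-1) (0, 0) = (i, j) → path ≠ [] →
      (path.length : Int) + (f : Int) = n →
      (∀ w, w ∈ Sf ↔ w ∈ S ∧ cw.toList <+: w.toList) →
      find_helper_py board n f Sf found i j cw path fin =
        (fin ++ ((pvGrow board f (path, cw)).filter (fun y => PySem.Set.contains S y.2)).map (·.1),
         pvAddAll found (((pvGrow board f (path, cw)).filter (fun y => PySem.Set.contains S y.2)).map (·.2))) := by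
  intro f
  induction f with
  | zero =>
    intro n Sf found i j cw path fin _ _ h3 h4
    have hlen : (path.length : Int) = n := by push_cast at h3; omega
    rw [find_helper_py.eq_def, if_pos hlen]
    by_cases hc : cw ∈ S
    · have hcSf : cw ∈ Sf := (h4 cw).mpr ⟨hc, List.prefix_refl _⟩
      simp [hcSf, hc, pvGrow, List.filter_cons, pvAddAll]
    · have hcSf : cw ∉ Sf := fun h => hc ((h4 cw).mp h).1
      simp [hcSf, hc, pvGrow, List.filter_cons, pvAddAll]
  | succ f ih =>
    intro n Sf found i j cw path fin h1 h2 h3 h4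
    have hne : ¬ ((path.length : Int) = n) := by push_cast at h3 ⊢; omega
    by_cases hSf : Sf = []
    · subst hSf
      have hfil :
          (pvGrow board (f + 1) (path, cw)).filter (fun y => PySem.Set.contains S y.2) = [] := by
        rw [List.filter_eq_nil_iff]
        intro y hy hq
        have hmem : y.2 ∈ S := (PySem.Set.contains_iff S y.2).mp hq
        have hpre : cw.toList <+: y.2.toList := pv_grow_prefix board (f + 1) (path, cw) y hy
        exact absurd ((h4 y.2).mpr ⟨hmem, hpre⟩) (List.not_mem_nil)
      rw [find_helper_py.eq_def, if_neg hne,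
        if_pos (show PySem.Set.len ([] : PySem.Set String) = 0 from rfl), hfil]
      simp [pvAddAll]
    · have hlen0 : ¬ (PySem.Set.len Sf = 0) := fun h => hSf ((pv_set_len_zero Sf).mp h)
      have hfold := pv_fold_moves board S f ih pvMovesA n Sf found i j cw path fin h1 h2
        (by push_cast at h3 ⊢; omega) h4
      rw [pvExtOver_movesA board i j path cw h1] at hfold
      have hgrow : (pvExt board (path, cw)).flatMap (pvGrow board f) = pvGrow board (f + 1) (path, cw) := rfl
      rw [hgrow] at hfold
      rw [find_helper_py.eq_def, if_neg hne, if_neg hlen0]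
      exact hfold

-- ---------- characterising A's per-length search ----------

def pvS0 (board : List (List String)) (S : PySem.Set String) : PySem.Set String :=
  PySem.Set.ofList (List.filter (fun w => is_word_on_board_py board w) S)

def pvStarts (board : List (List String)) : List (List (Int × Int) × String) :=
  (PySem.List.pyRange 0 (board.length : Int) 1).flatMap (fun i =>
    (PySem.List.pyRange 0 ((PySem.List.pyGetD board 0 []).length : Int) 1).map
      (fun j => ([(i, j)], pvCell board i j)))

def pvMatched (board : List (List String)) (S : PySem.Set String) (n : Int) :
    List (List (Int × Int) × String) :=
  ((pvStarts board).flatMap (pvGrow board (n - 1).toNat)).filter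
    (fun y => PySem.Set.contains (pvS0 board S) y.2)

lemma pv_foldl_accum {σ : Type}
    (step : List (List (Int × Int)) × PySem.Set String → σ → List (List (Int × Int)) × PySem.Set String)
    (h : σ → List (List (Int × Int) × String)) :
    ∀ (l : List σ),
      (∀ st a, a ∈ l → step st a = (st.1 ++ ((h a).map (·.1)), pvAddAll st.2 ((h a).map (·.2)))) →
      ∀ P Fd, l.foldl step (P, Fd) =
        (P ++ ((l.flatMap h).map (·.1)), pvAddAll Fd ((l.flatMap h).map (·.2))) := by
  intro l
  induction l with
  | nil => intro _ P Fd; simp [pvAddAll]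
  | cons a l ihl =>
    intro hstep P Fd
    simp only [List.foldl_cons]
    rw [hstep (P, Fd) a List.mem_cons_self]
    rw [ihl (fun st b hb => hstep st b (List.mem_cons_of_mem a hb))]
    simp [List.flatMap_cons, List.map_append, pvAddAll_append, List.append_assoc]

theorem pv_find_char (board : List (List String)) (S : PySem.Set String) (n : Int) (hn : 1 ≤ n) :
    find_length_n_paths_return_words_py n board S =
      ((pvMatched board S n).map (·.1),
       pvAddAll PySem.Set.empty ((pvMatched board S n).map (·.2))) := by
  simp only [find_length_n_paths_return_words_py]
  simp only [show PySem.Set.ofList (List.filter (fun w => is_word_on_board_py board w) S)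
      = pvS0 board S from rfl]
  have hone : ∀ (i j : Int), PySem.List.pyGetD [(i, j)] (-1) ((0 : Int), (0 : Int)) = (i, j) := by
    intro i j
    simpa using PySem.List.pyGetD_neg_one_append_singleton ([] : List (Int × Int)) (i, j) (0, 0)
  have inner : ∀ (i : Int) (st : List (List (Int × Int)) × PySem.Set String),
      (PySem.List.pyRange 0 ((PySem.List.pyGetD board 0 []).length : Int) 1).foldl
        (fun st j =>
          find_helper_py board n (n - 1).toNat
            (words_starts_with_py (pvS0 board S) (pvCell board i j)) st.2 i j
            (pvCell board i j) [(i, j)] st.1) st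
      = (st.1 ++ (((PySem.List.pyRange 0 ((PySem.List.pyGetD board 0 []).length : Int) 1).flatMap
            (fun j => (pvGrow board (n - 1).toNat ([(i, j)], pvCell board i j)).filter
              (fun y => PySem.Set.contains (pvS0 board S) y.2))).map (·.1)),
         pvAddAll st.2 (((PySem.List.pyRange 0 ((PySem.List.pyGetD board 0 []).length : Int) 1).flatMap
            (fun j => (pvGrow board (n - 1).toNat ([(i, j)], pvCell board i j)).filter
              (fun y => PySem.Set.contains (pvS0 board S) y.2))).map (·.2))) := by
    intro i st
    exact pv_foldl_accum _ _ _
      (fun st j _ =>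
        pv_helper_char board (pvS0 board S) (n - 1).toNat n
          (words_starts_with_py (pvS0 board S) (pvCell board i j)) st.2 i j
          (pvCell board i j) [(i, j)] st.1 (hone i j) (by simp)
          (by simp; omega)
          (fun w => pv_mem_wsw (pvS0 board S) (pvCell board i j) w)) st.1 st.2
  rw [pv_foldl_accum _
      (fun i => (PySem.List.pyRange 0 ((PySem.List.pyGetD board 0 []).length : Int) 1).flatMap
            (fun j => (pvGrow board (n - 1).toNat ([(i, j)], pvCell board i j)).filter
              (fun y => PySem.Set.contains (pvS0 board S) y.2)))
      (PySem.List.pyRange 0 (board.length : Int) 1)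
      (fun st i _ => inner i st) [] PySem.Set.empty]
  simp [pvMatched, pvStarts, pvS0, List.filter_flatMap, List.flatMap_assoc, List.flatMap_map]

-- ---------- the B-side level expansion computes the same filtered pvGrow ----------

def pvExtB (board : List (List String)) (rows cols : Int) (x : List (Int × Int) × String) :
    List (List (Int × Int) × String) :=
  pvMovesB.flatMap (fun mv =>
    let ij := PySem.List.pyGetD x.1 (-1) (0, 0)
    let ni := ij.1 + mv.1
    let nj := ij.2 + mv.2
    if 0 ≤ ni ∧ ni < rows ∧ 0 ≤ nj ∧ nj < cols ∧ (ni, nj) ∉ x.1 then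
      [(x.1 ++ [(ni, nj)], x.2 ++ pvCell board ni nj)]
    else [])

def pvOneB (board : List (List String)) (rows cols : Int) (alive : PySem.Set String)
    (x : List (Int × Int) × String) : List (List (Int × Int) × String) :=
  if alive.any (fun w => PySem.Str.startswith w x.2) then pvExtB board rows cols x else []

lemma pvBStep_eq (board : List (List String)) (rows cols : Int) (alive : PySem.Set String)
    (F : List (List (Int × Int) × String)) :
    pvBStep board rows cols alive F = F.flatMap (pvOneB board rows cols alive) := rfl

def pvGrowP (board : List (List String)) (rows cols : Int) (alive : PySem.Set String) :
    Nat → (List (Int × Int) × String) → List (List (Int × Int) × String)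
  | 0, x => [x]
  | k + 1, x => (pvOneB board rows cols alive x).flatMap (pvGrowP board rows cols alive k)

def pvIter (board : List (List String)) (rows cols : Int) (alive : PySem.Set String) :
    Nat → List (List (Int × Int) × String) → List (List (Int × Int) × String)
  | 0, F => F
  | k + 1, F => pvIter board rows cols alive k (pvBStep board rows cols alive F)

lemma pvIter_flatMap (board : List (List String)) (rows cols : Int) (alive : PySem.Set String) :
    ∀ (k : Nat) (F : List (List (Int × Int) × String)),
      pvIter board rows cols alive k F = F.flatMap (pvGrowP board rows cols alive k) := by
  intro k
  induction k with
  | zero => intro F; simp [pvIter, pvGrowP]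
  | succ k ihk =>
    intro F
    show pvIter board rows cols alive k (pvBStep board rows cols alive F) = _
    rw [ihk, pvBStep_eq, List.flatMap_assoc]
    rfl

lemma pv_safe_iff (ni nj : Int) (board : List (List String)) (path : List (Int × Int)) :
    safe_to_move_py ni nj board path = true ↔
      (0 ≤ ni ∧ ni < (board.length : Int) ∧ 0 ≤ nj ∧
        nj < ((PySem.List.pyGetD board 0 []).length : Int) ∧ (ni, nj) ∉ path) := by
  unfold safe_to_move_py
  split_ifs with h
  · simp only [Bool.false_eq_true, false_iff]
    rintro ⟨h1, h2, h3, h4, -⟩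
    rcases h with h | h | h | h <;> omega
  · push_neg at h
    simp only [decide_eq_true_eq]
    constructor
    · intro hmem
      exact ⟨by omega, by omega, by omega, by omega, hmem⟩
    · rintro ⟨-, -, -, -, hmem⟩
      exact hmem

lemma pvExtB_eq_pvExt (board : List (List String)) (x : List (Int × Int) × String)
    (hx : x.1 ≠ []) :
    pvExtB board (board.length : Int) ((PySem.List.pyGetD board 0 []).length : Int) x =
      pvExt board x := by
  have hmem : PySem.List.pyGetD x.1 (-1) ((0 : Int), (0 : Int)) ∈ x.1 := by
    rw [PySem.List.pyGetD_neg_one x.1 _ hx]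
    exact List.getLast_mem hx
  have hsplit : ∀ (f : Int × Int → List (List (Int × Int) × String)), f (0, 0) = [] →
      pvMovesA.flatMap f = pvMovesB.flatMap f := by
    intro f hf
    simp [pvMovesA, pvMovesB, List.flatMap_cons, List.flatMap_nil, hf]
  have h00 : safe_to_move_py (PySem.List.pyGetD x.1 (-1) ((0:Int), (0:Int))).1
      (PySem.List.pyGetD x.1 (-1) ((0:Int), (0:Int))).2 board x.1 = false := by
    rw [Bool.eq_false_iff]
    intro h
    have := ((pv_safe_iff _ _ board x.1).mp h).2.2.2.2
    rw [Prod.mk.eta] at this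
    exact this hmem
  show pvExtB board _ _ x = pvExt board x
  rw [pvExtB, pvExt]
  rw [hsplit _ (by simp [h00])]
  refine List.flatMap_congr (fun mv _ => ?_)
  simp only []
  by_cases hp : 0 ≤ (PySem.List.pyGetD x.1 (-1) ((0:Int), (0:Int))).1 + mv.1 ∧
      (PySem.List.pyGetD x.1 (-1) ((0:Int), (0:Int))).1 + mv.1 < (board.length : Int) ∧
      0 ≤ (PySem.List.pyGetD x.1 (-1) ((0:Int), (0:Int))).2 + mv.2 ∧
      (PySem.List.pyGetD x.1 (-1) ((0:Int), (0:Int))).2 + mv.2 < ((PySem.List.pyGetD board 0 []).length : Int) ∧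
      ((PySem.List.pyGetD x.1 (-1) ((0:Int), (0:Int))).1 + mv.1,
       (PySem.List.pyGetD x.1 (-1) ((0:Int), (0:Int))).2 + mv.2) ∉ x.1
  · rw [if_pos hp, if_pos ((pv_safe_iff _ _ board x.1).mpr hp)]
  · rw [if_neg hp, if_neg (fun h => hp ((pv_safe_iff _ _ board x.1).mp h))]

lemma pv_filter_growP (board : List (List String)) (alive : PySem.Set String)
    (q : List (Int × Int) × String → Bool) (hq : ∀ y, q y = true → y.2 ∈ alive) :
    ∀ (k : Nat) (x : List (Int × Int) × String), x.1 ≠ [] →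
      (pvGrowP board (board.length : Int) ((PySem.List.pyGetD board 0 []).length : Int) alive k x).filter q
        = (pvGrow board k x).filter q := by
  intro k
  induction k with
  | zero => intro x _; simp [pvGrowP, pvGrow]
  | succ k ihk =>
    intro x hx
    by_cases hg : alive.any (fun w => PySem.Str.startswith w x.2) = true
    · have hP : pvGrowP board (board.length : Int) ((PySem.List.pyGetD board 0 []).length : Int) alive (k + 1) x
          = (pvExt board x).flatMap (pvGrowP board (board.length : Int) ((PySem.List.pyGetD board 0 []).length : Int) alive k) := by
        show (pvOneB _ _ _ _ x).flatMap _ = _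
        rw [pvOneB, if_pos hg, pvExtB_eq_pvExt board x hx]
      rw [hP]
      show ((pvExt board x).flatMap _).filter q = ((pvExt board x).flatMap (pvGrow board k)).filter q
      rw [List.filter_flatMap, List.filter_flatMap]
      exact List.flatMap_congr (fun c hc => ihk c (by
        have := pv_ext_mem board x c hc
        exact this.1))
    · have hP : pvGrowP board (board.length : Int) ((PySem.List.pyGetD board 0 []).length : Int) alive (k + 1) x = [] := by
        show (pvOneB _ _ _ _ x).flatMap _ = _
        rw [pvOneB, if_neg hg]
        rfl
      rw [hP, List.filter_nil]
      symm
      rw [List.filter_eq_nil_iff]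
      intro y hy hqy
      have hmem : y.2 ∈ alive := hq y hqy
      have hpre : x.2.toList <+: y.2.toList := pv_grow_prefix board (k + 1) x y hy
      apply hg
      rw [List.any_eq_true]
      exact ⟨y.2, hmem, by
        rw [PySem.Str.startswith_eq]
        exact (PySem.Chars.startswith_iff _ _).mpr hpre⟩

-- ---------- the B-side while loop fills the buckets ----------

lemma pvBStep_nil (board : List (List String)) (rows cols : Int) (alive : PySem.Set String) :
    pvBStep board rows cols alive [] = [] := rfl

lemma pvIter_nil (board : List (List String)) (rows cols : Int) (alive : PySem.Set String) :
    ∀ k, pvIter board rows cols alive k [] = [] := by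
  intro k
  induction k with
  | zero => rfl
  | succ k ihk => show pvIter board rows cols alive k (pvBStep board rows cols alive []) = []
                  rw [pvBStep_nil]; exact ihk

lemma pvBLoop_getD_lt (board : List (List String)) (rows cols : Int) (alive : PySem.Set String) :
    ∀ (fuel : Nat) (n : Int) (F : List (List (Int × Int) × String))
      (B : PySem.Dict Int (List (List (Int × Int) × String))) (m : Int), m < n →
      (pvBLoop board rows cols alive fuel n F B).getD m [] = B.getD m [] := by
  intro fuel
  induction fuel with
  | zero => intro n F B m _; rfl
  | succ fuel ihf =>
    intro n F B m hm
    rw [pvBLoop.eq_def]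
    simp only []
    split
    · rfl
    · rw [ihf (n + 1) _ _ m (by omega)]
      split
      · rfl
      · rw [PySem.Dict.getD_insert, if_neg (show ¬ m = n by omega)]

lemma pvBLoop_getD (board : List (List String)) (rows cols : Int) (alive : PySem.Set String) :
    ∀ (fuel : Nat) (n : Int) (F : List (List (Int × Int) × String))
      (B : PySem.Dict Int (List (List (Int × Int) × String))) (m : Int),
      B.contains m = false → n ≤ m → m < n + (fuel : Int) →
      (pvBLoop board rows cols alive fuel n F B).getD m [] =
        (pvIter board rows cols alive (m - n).toNat F).filter
          (fun pw => PySem.Set.contains alive pw.2) := by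
  intro fuel
  induction fuel with
  | zero => intro n F B m _ _ h; exact absurd h (by push_cast; omega)
  | succ fuel ihf =>
    intro n F B m hB hnm hmf
    rw [pvBLoop.eq_def]
    simp only []
    split
    · next hF =>
      have hFnil : F = [] := by simpa using hF
      subst hFnil
      rw [pvIter_nil]
      simp [PySem.Dict.getD_of_not_contains _ _ hB]
    · next hF =>
      by_cases hm : m = n
      · subst hm
        rw [pvBLoop_getD_lt board rows cols alive fuel (m + 1) _ _ m (by omega)]
        have h0 : (m - m).toNat = 0 := by omega
        rw [h0]
        show _ = F.filter (fun pw => PySem.Set.contains alive pw.2)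
        split
        · next hbe =>
          have : F.filter (fun pw => PySem.Set.contains alive pw.2) = [] := by simpa using hbe
          rw [this, PySem.Dict.getD_of_not_contains _ _ hB]
        · rw [PySem.Dict.getD_insert, if_pos rfl]
      · have hlt : n < m := by omega
        have hB' : (if (F.filter (fun pw => PySem.Set.contains alive pw.2)).isEmpty then B
            else B.insert n (F.filter (fun pw => PySem.Set.contains alive pw.2))).contains m = false := by
          split
          · exact hB
          · rw [PySem.Dict.contains_insert]
            simp only [hB, Bool.or_false]
            simpa using hm
        rw [ihf (n + 1) _ _ m hB' (by omega) (by push_cast at hmf ⊢; omega)]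
        have harith : (m - n).toNat = (m - (n + 1)).toNat + 1 := by omega
        rw [harith]
        rfl

-- ---------- matching up both sides ----------

def pvChars (board : List (List String)) : PySem.Set Char :=
  PySem.Set.ofList (board.flatMap (fun row => row.flatMap (fun cell => cell.toList)))

def pvCols (board : List (List String)) : Int :=
  if board.isEmpty then 0 else ((PySem.List.pyGetD board 0 []).length : Int)

def pvAlive (board : List (List String)) (words : List String) : PySem.Set String :=
  PySem.Set.ofList
    (List.filter (fun w => w.toList.all (fun ch => PySem.Set.contains (pvChars board) ch))
      (PySem.Set.ofList words))

def pvFrontier0 (board : List (List String)) : List (List (Int × Int) × String) :=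
  (PySem.List.pyRange 0 (board.length : Int) 1).flatMap (fun i =>
    (PySem.List.pyRange 0 (pvCols board) 1).map (fun j => ([(i, j)], pvCell board i j)))

def pvBuckets (board : List (List String)) (words : List String) :
    PySem.Dict Int (List (List (Int × Int) × String)) :=
  pvBLoop board (board.length : Int) (pvCols board) (pvAlive board words)
    ((board.length : Int) * (board.length : Int)).toNat 1 (pvFrontier0 board) PySem.Dict.empty

lemma pvCols_eq (board : List (List String)) (hb : board ≠ []) :
    pvCols board = ((PySem.List.pyGetD board 0 []).length : Int) := by
  simp [pvCols, hb]

lemma pvFrontier0_eq_starts (board : List (List String)) (hb : board ≠ []) :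
    pvFrontier0 board = pvStarts board := by
  rw [pvFrontier0, pvStarts, pvCols_eq board hb]

lemma pvFrontier0_shape (board : List (List String)) (x : List (Int × Int) × String)
    (hx : x ∈ pvFrontier0 board) : x.1 ≠ [] := by
  simp only [pvFrontier0, List.mem_flatMap, List.mem_map] at hx
  obtain ⟨i, _, j, _, rfl⟩ := hx
  simp

-- A's character test equals B's: membership of one character in the join of the distinct
-- cells is membership in the set of all characters on the board
lemma pv_OB_eq (board : List (List String)) (w : String) :
    is_word_on_board_py board w =
      w.toList.all (fun c => PySem.Set.contains (pvChars board) c) := by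
  unfold is_word_on_board_py
  refine List.all_congr rfl (fun c => ?_)
  apply (by decide : ∀ a b : Bool, (a = true ↔ b = true) → a = b)
  rw [PySem.Str.isIn_iff_infix, PySem.Set.contains_iff]
  have hjoin : (PySem.Str.join "" (PySem.Set.ofList (board.flatMap id))).toList =
      ((PySem.Set.ofList (board.flatMap id)).map String.toList).flatten := by
    rw [PySem.Str.toList_join]
    show PySem.Chars.join [] _ = _
    rw [PySem.Chars.join]
    induction (PySem.Set.ofList (board.flatMap id)).map String.toList with
    | nil => rfl
    | cons a l ihl =>
      cases l with
      | nil => simp [List.intercalate]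
      | cons b l =>
        simp only [List.intercalate] at ihl ⊢
        simp [List.intersperse] at ihl ⊢
        exact ihl
  constructor
  · intro hinf
    have hc : c ∈ (PySem.Str.join "" (PySem.Set.ofList (board.flatMap id))).toList := by
      have : (String.ofList [c]).toList = [c] := by simp
      rw [this] at hinf
      exact hinf.sublist.subset (by simp)
    rw [hjoin] at hc
    simp only [List.mem_flatten, List.mem_map] at hc
    obtain ⟨l, ⟨cell, hcell, rfl⟩, hcl⟩ := hc
    rw [PySem.Set.mem_ofList] at hcell
    simp only [List.mem_flatMap, id] at hcell
    obtain ⟨row, hrow, hcellrow⟩ := hcell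
    rw [pvChars, PySem.Set.mem_ofList]
    simp only [List.mem_flatMap]
    exact ⟨row, hrow, cell, hcellrow, hcl⟩
  · intro hc
    rw [pvChars, PySem.Set.mem_ofList] at hc
    simp only [List.mem_flatMap] at hc
    obtain ⟨row, hrow, cell, hcell, hcl⟩ := hc
    have hcell' : cell ∈ PySem.Set.ofList (board.flatMap id) := by
      rw [PySem.Set.mem_ofList]
      simp only [List.mem_flatMap, id]
      exact ⟨row, hrow, hcell⟩
    have hmem : c ∈ (PySem.Str.join "" (PySem.Set.ofList (board.flatMap id))).toList := by
      rw [hjoin]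
      simp only [List.mem_flatten, List.mem_map]
      exact ⟨cell.toList, ⟨cell, hcell', rfl⟩, hcl⟩
    obtain ⟨s, t, heq⟩ := List.append_of_mem hmem
    rw [show (String.ofList [c]).toList = [c] from by simp, heq]
    exact ⟨s, t, by simp⟩

lemma pv_main_fold (board : List (List String)) (words : List String) (hb : board ≠ []) :
    ∀ (ns : List Int), (∀ n ∈ ns, 1 ≤ n ∧ n ≤ (board.length : Int) * (board.length : Int)) →
    ∀ (acc : List (Int × List (List (Int × Int)))) (SA rem : PySem.Set String),
      (∀ w, w ∈ SA ↔ w ∈ rem) → (∀ w, w ∈ SA → w ∈ PySem.Set.ofList words) →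
      (ns.foldl (fun st i =>
          let r := find_length_n_paths_return_words_py i board st.2
          if 0 < r.1.length then (st.1 ++ [(i, r.1)], PySem.Set.diff st.2 r.2) else st)
        (acc, SA)).1
      = (ns.foldl (fun st n =>
          let kept := ((pvBuckets board words).getD n []).filter
            (fun pw => PySem.Set.contains st.2 pw.2)
          if kept.isEmpty then st
          else (st.1 ++ [(n, kept.map (·.1))], PySem.Set.diff st.2 (kept.map (·.2))))
        (acc, rem)).1 := by
  intro ns
  induction ns with
  | nil => intro _ acc SA rem _ _; rfl
  | cons n ns ihn =>
    intro hbound acc SA rem hiff hsub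
    obtain ⟨hn1, hn2⟩ := hbound n List.mem_cons_self
    have hbound' : ∀ m ∈ ns, 1 ≤ m ∧ m ≤ (board.length : Int) * (board.length : Int) :=
      fun m hm => hbound m (List.mem_cons_of_mem n hm)
    -- the bucket at n, rewritten to the filtered pvGrow form
    have hbucket : ((pvBuckets board words).getD n []).filter
        (fun pw => PySem.Set.contains rem pw.2) = pvMatched board SA n := by
      rw [pvBuckets, pvBLoop_getD board _ _ _ _ 1 _ _ n (PySem.Dict.contains_empty n) hn1
        (by push_cast; omega)]
      rw [List.filter_filter]
      rw [pvIter_flatMap, List.filter_flatMap]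
      have hcols := pvCols_eq board hb
      have hstep : ∀ x ∈ pvFrontier0 board,
          (pvGrowP board (board.length : Int) (pvCols board) (pvAlive board words) (n - 1).toNat x).filter
              (fun a => PySem.Set.contains rem a.2 && PySem.Set.contains (pvAlive board words) a.2)
          = (pvGrow board (n - 1).toNat x).filter
              (fun a => PySem.Set.contains rem a.2 && PySem.Set.contains (pvAlive board words) a.2) := by
        intro x hx
        rw [hcols]
        exact pv_filter_growP board (pvAlive board words) _
          (fun y hy => (PySem.Set.contains_iff _ _).mp (Bool.and_elim_right hy))
          (n - 1).toNat x (pvFrontier0_shape board x hx)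
      rw [List.flatMap_congr hstep]
      rw [← List.filter_flatMap]
      rw [pvFrontier0_eq_starts board hb]
      rw [pvMatched]
      apply List.filter_congr
      intro y _
      apply (by decide : ∀ a b : Bool, (a = true ↔ b = true) → a = b)
      rw [Bool.and_eq_true, PySem.Set.contains_iff, PySem.Set.contains_iff, PySem.Set.contains_iff]
      rw [pvS0, PySem.Set.mem_ofList, List.mem_filter]
      rw [pvAlive, PySem.Set.mem_ofList, List.mem_filter]
      rw [pv_OB_eq board y.2]
      constructor
      · rintro ⟨hr, _, hchars⟩
        exact ⟨(hiff y.2).mpr hr, hchars⟩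
      · rintro ⟨hSA, hchars⟩
        exact ⟨(hiff y.2).mp hSA, ⟨hsub y.2 hSA, hchars⟩⟩
    have hfind := pv_find_char board SA n hn1
    simp only [List.foldl_cons, hfind, hbucket]
    by_cases hM : pvMatched board SA n = []
    · rw [hM]
      rw [if_neg (show ¬ (0 : Nat) < (List.map (fun x : List (Int × Int) × String => x.1)
            ([] : List (List (Int × Int) × String))).length by simp),
          if_pos (show (([] : List (List (Int × Int) × String)).isEmpty) = true from rfl)]
      exact ihn hbound' acc SA rem hiff hsub
    · rw [if_pos (show 0 < ((pvMatched board SA n).map (·.1)).length by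
            simp [List.length_pos_iff, hM]),
          if_neg (show ¬ ((pvMatched board SA n).isEmpty) = true by simp [hM])]
      apply ihn hbound'
      · intro w
        rw [PySem.Set.mem_diff, PySem.Set.mem_diff, pv_mem_addAll]
        constructor
        · rintro ⟨hw, hnw⟩
          refine ⟨(hiff w).mp hw, fun hmem => hnw (Or.inr hmem)⟩
        · rintro ⟨hw, hnw⟩
          refine ⟨(hiff w).mpr hw, fun hmem => ?_⟩
          rcases hmem with h | h
          · exact absurd h List.not_mem_nil
          · exact hnw h
      · intro w hw
        rw [PySem.Set.mem_diff] at hw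
        exact hsub w hw.1

theorem pv_main (board : List (List String)) (words : List String) :
    get_paths_for_each_length_py board words = get_paths_for_each_length_py_alt board words := by
  by_cases hb : board = []
  · subst hb
    rfl
  · unfold get_paths_for_each_length_py get_paths_for_each_length_py_alt
    rw [show (((board.length : Int)) ^ 2) = (board.length : Int) * (board.length : Int) from by ring]
    exact pv_main_fold board words hb
      (PySem.List.pyRange ((board.length : Int) * (board.length : Int)) 0 (-1))
      (fun n hn => by
        rw [PySem.List.mem_pyRange_neg_one] at hn
        exact ⟨by omega, hn.2⟩)
      [] (PySem.Set.ofList words) (PySem.Set.ofList words)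
      (fun w => Iff.rfl) (fun w h => h)

-- ===== VERDICT (by name: the statement is the Claim_ definition above) =====
theorem get_paths_for_each_length_py_spec : Claim_equal_get_paths_for_each_length_py := by
  intro board words _ _
  unfold Spec_get_paths_for_each_length_py
  exact pv_main board words
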